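-- pv_equiv track=rewrite | github.com/SylvainDe/ProjectEulerPython | euler.py | euler100
-- ===== SOURCE A (Python) =====
-- def euler100(lim=1000000000000):
--     """Solution for problem 100."""
--     # P(BB) = (b/t) * ((b-1)/(t-1))
--     # P(BB) = 1/2
--     # => 2 * b  * (b - 1) = t * (t - 1)
--     # https://oeis.org/A046090
--     b0, b1 = 1, 3
--     r0, r1 = 0, 1
--     while True:
--         if b0 + r0 > lim:
--             return b0
--         b0, b1 = b1, 6 * b1 - b0 - 2
--         r0, r1 = r1, 6 * r1 - r0
-- ===== SOURCE B (Python) =====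
-- def euler100(lim=1000000000000):
--     """Solution for problem 100."""
--     # Work in Z[sqrt(2)]: a pair (x, y) means x + y*sqrt(2).
--     # Problem-100 solutions satisfy x**2 - 2*y**2 == -1 with x = 2*total - 1
--     # and y = 2*blue - 1, and are exactly (1, 1) * (3 + 2*sqrt(2))**k.
--     # Find the first solution with total > lim (i.e. x > 2*lim - 1) by
--     # exponentiation-by-squaring plus a greedy binary descent over the
--     # precomputed squarings, then read off blue = (y + 1) // 2.
--     def mul(p, q):
--         a, b = p
--         c, d = q
--         return (a * c + 2 * b * d, a * d + b * c)
--
--     target = 2 * lim - 1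
--     if 1 > target:
--         return 1
--     pows = [(3, 2)]
--     while mul((1, 1), pows[-1])[0] <= target:
--         pows.append(mul(pows[-1], pows[-1]))
--     acc = (1, 1)
--     for q in reversed(pows):
--         c = mul(acc, q)
--         if c[0] <= target:
--             acc = c
--     x, y = mul(acc, (3, 2))
--     return (y + 1) // 2
-- ===== Notes on version B (the rewrite author's own statement) =====
-- stated objective: alternative
-- what changed: B finds the first Pell solution (x,y) of x^2-2y^2=-1 with x>2*lim-1 by exponentiation-by-squaring in Z[sqrt 2] followed by a greedy binary descent over the precomputed squarings, instead of A's step-by-step interleaved second-order linear recurrences.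
import Mathlib
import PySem

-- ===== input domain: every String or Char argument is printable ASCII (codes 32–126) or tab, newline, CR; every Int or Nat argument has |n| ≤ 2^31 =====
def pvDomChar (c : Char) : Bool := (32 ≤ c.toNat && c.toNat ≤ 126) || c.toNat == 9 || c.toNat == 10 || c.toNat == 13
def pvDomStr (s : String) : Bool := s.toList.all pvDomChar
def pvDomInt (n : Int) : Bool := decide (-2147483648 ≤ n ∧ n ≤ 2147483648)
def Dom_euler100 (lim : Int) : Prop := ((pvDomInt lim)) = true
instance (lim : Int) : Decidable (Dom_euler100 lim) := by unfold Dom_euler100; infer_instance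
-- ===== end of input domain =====

-- B replaces A's interleaved second-order recurrences by a search for the first
-- Pell solution of x^2 - 2y^2 = -1 with x > 2*lim - 1, using exponentiation by
-- squaring in Z[sqrt 2] plus a greedy binary descent (objective: alternative algorithm).

-- ===== PORT A =====
-- A's `while True` loop; the proof arguments (sum positive and strictly growing)
-- only justify termination, the computation is A's step for step.
def eulerLoopA (lim b0 b1 r0 r1 : Int) (h1 : 0 < b0 + r0) (h2 : b0 + r0 < b1 + r1) : Int :=
  if b0 + r0 > lim then b0
  else eulerLoopA lim b1 (6 * b1 - b0 - 2) r1 (6 * r1 - r0) (by omega) (by omega)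
termination_by (lim + 1 - (b0 + r0)).toNat
decreasing_by omega

def euler100 (lim : Int) : Int :=
  eulerLoopA lim 1 3 0 1 (by norm_num) (by norm_num)

-- ===== PORT B =====
-- Source B's local `mul`: (x, y) represents x + y*sqrt(2)
def zmul (p q : Int × Int) : Int × Int :=
  (p.1 * q.1 + 2 * p.2 * q.2, p.1 * q.2 + p.2 * q.1)

-- termination facts for Source B's `while` loop (cited by name from the port)
lemma zmul_sq_x (p : Int × Int) (hx : 3 ≤ p.1) (hy : 2 ≤ p.2) : 3 ≤ (zmul p p).1 := by
  simp only [zmul]; nlinarith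

lemma zmul_sq_y (p : Int × Int) (hx : 3 ≤ p.1) (hy : 2 ≤ p.2) : 2 ≤ (zmul p p).2 := by
  simp only [zmul]; nlinarith

lemma buildPows_dec (target : Int) (p : Int × Int) (hx : 3 ≤ p.1) (hy : 2 ≤ p.2)
    (hc : (zmul (1, 1) p).1 ≤ target) :
    (target + 1 - (zmul (1, 1) (zmul p p)).1).toNat < (target + 1 - (zmul (1, 1) p).1).toNat := by
  simp only [zmul] at *
  have : 1 * p.1 + 2 * 1 * p.2 <
      1 * (p.1 * p.1 + 2 * p.2 * p.2) + 2 * 1 * (p.1 * p.2 + p.2 * p.1) := by nlinarith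
  omega

-- Source B's `while` loop collecting the squarings; invariants 3 ≤ x, 2 ≤ y for termination only
def buildPows (target : Int) (p : Int × Int) (hx : 3 ≤ p.1) (hy : 2 ≤ p.2) : List (Int × Int) :=
  if h : (zmul (1, 1) p).1 ≤ target then
    p :: buildPows target (zmul p p) (zmul_sq_x p hx hy) (zmul_sq_y p hx hy)
  else [p]
termination_by (target + 1 - (zmul (1, 1) p).1).toNat
decreasing_by exact buildPows_dec target p hx hy h

-- Source B's body after `target = 2*lim - 1`; the early return, the squarings, the
-- greedy descent over them in reverse, and the final read-off, step for step
def eulerAltBody (target : Int) : Int :=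
  if 1 > target then 1
  else
    ((zmul ((buildPows target (3, 2) (by norm_num) (by norm_num)).reverse.foldl
        (fun acc q => if (zmul acc q).1 ≤ target then zmul acc q else acc) (1, 1))
      (3, 2)).2 + 1) / 2

def euler100_alt (lim : Int) : Int := eulerAltBody (2 * lim - 1)

-- ===== PRECONDITION & SPEC =====
def Spec_euler100 (lim : Int) (out : Int) : Prop := out = euler100_alt lim
instance (lim : Int) (out : Int) : Decidable (Spec_euler100 lim out) := by unfold Spec_euler100; infer_instance

-- ===== CLAIM (what is proved, stated in full; the proofs are below) =====
def Claim_equal_euler100 : Prop := ∀ (lim : Int), Dom_euler100 lim → Spec_euler100 lim (euler100 lim)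

-- ===== LEMMAS AND PROOFS =====

-- the Pell solutions (x_k, y_k) = (1,1) * (3 + 2*sqrt 2)^k
def sol : Nat → Int × Int
  | 0 => (1, 1)
  | k + 1 => zmul (sol k) (3, 2)

-- the squarings g^(2^j) of g = 3 + 2*sqrt 2
def gp : Nat → Int × Int
  | 0 => (3, 2)
  | j + 1 => zmul (gp j) (gp j)

-- A's two sequences, indexed
def aB : Nat → Int
  | 0 => 1
  | 1 => 3
  | k + 2 => 6 * aB (k + 1) - aB k - 2

def aR : Nat → Int
  | 0 => 0
  | 1 => 1
  | k + 2 => 6 * aR (k + 1) - aR k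

lemma zmul_assoc (p q r : Int × Int) : zmul (zmul p q) r = zmul p (zmul q r) := by
  simp only [zmul, Prod.mk.injEq]
  constructor <;> ring

lemma sol_pos (k : Nat) : 1 ≤ (sol k).1 ∧ 1 ≤ (sol k).2 := by
  induction k with
  | zero => simp [sol]
  | succ k ih =>
    obtain ⟨hx, hy⟩ := ih
    simp only [sol, zmul]
    constructor <;> nlinarith

lemma sol_x_lt (k : Nat) : (sol k).1 < (sol (k + 1)).1 := by
  have := sol_pos k
  simp only [sol, zmul]
  nlinarith [this.1, this.2]

lemma sol_x_mono : StrictMono (fun k => (sol k).1) :=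
  strictMono_nat_of_lt_succ sol_x_lt

lemma sol_x_ge (k : Nat) : 1 + (k : Int) ≤ (sol k).1 := by
  induction k with
  | zero => simp [sol]
  | succ k ih =>
    have := sol_x_lt k
    push_cast
    omega

lemma exists_big (lim : Int) : ∃ k, 2 * lim - 1 < (sol k).1 := by
  refine ⟨(2 * lim).toNat, ?_⟩
  have := sol_x_ge (2 * lim).toNat
  omega

-- the index of the first solution with total > lim
def Kk (lim : Int) : Nat := Nat.find (exists_big lim)

lemma sol_add_gp (j : Nat) : ∀ k, zmul (sol k) (gp j) = sol (k + 2 ^ j) := by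
  induction j with
  | zero => intro k; simp only [gp, pow_zero]; rfl
  | succ j ih =>
    intro k
    have : zmul (sol k) (gp (j + 1)) = zmul (zmul (sol k) (gp j)) (gp j) := by
      simp only [gp]; rw [zmul_assoc]
    rw [this, ih k, ih (k + 2 ^ j)]
    congr 1
    rw [pow_succ]
    omega

lemma sol_second_order (k : Nat) :
    (sol (k + 2)).1 = 6 * (sol (k + 1)).1 - (sol k).1 ∧
    (sol (k + 2)).2 = 6 * (sol (k + 1)).2 - (sol k).2 := by
  simp only [sol, zmul]
  constructor <;> ring

lemma sol_link (k : Nat) :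
    (sol k).2 = 2 * aB k - 1 ∧ (sol k).1 = 2 * (aB k + aR k) - 1 := by
  induction k using Nat.twoStepInduction with
  | zero => decide
  | one => decide
  | more k ih1 ih2 =>
    obtain ⟨hy0, hx0⟩ := ih1
    obtain ⟨hy1, hx1⟩ := ih2
    obtain ⟨hx2, hy2⟩ := sol_second_order k
    have rB : aB (k + 2) = 6 * aB (k + 1) - aB k - 2 := by rfl
    have rR : aR (k + 2) = 6 * aR (k + 1) - aR k := by rfl
    constructor
    · rw [hy2, hy1, hy0, rB]; ring
    · rw [hx2, hx1, hx0, rB, rR]; ring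

-- "total at index j exceeds lim" in the two coordinate systems
lemma P_iff (lim : Int) (j : Nat) : (2 * lim - 1 < (sol j).1) ↔ (lim < aB j + aR j) := by
  have := (sol_link j).2
  omega

-- A's loop computes aB at the first index whose total exceeds lim
lemma loopA_eq (lim : Int) (b0 b1 r0 r1 : Int) (h1 : 0 < b0 + r0) (h2 : b0 + r0 < b1 + r1)
    (k : Nat) (e0 : b0 = aB k) (e1 : b1 = aB (k + 1)) (e2 : r0 = aR k) (e3 : r1 = aR (k + 1))
    (hmin : ∀ j, j < k → aB j + aR j ≤ lim) :
    eulerLoopA lim b0 b1 r0 r1 h1 h2 = aB (Kk lim) := by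
  induction b0, b1, r0, r1, h1, h2 using eulerLoopA.induct lim generalizing k with
  | case1 b0 b1 r0 r1 h1 h2 hgt =>
    rw [eulerLoopA, if_pos hgt]
    have hK : Kk lim = k := by
      rw [Kk, Nat.find_eq_iff]
      refine ⟨?_, ?_⟩
      · rw [P_iff]; omega
      · intro j hj
        rw [P_iff]
        have := hmin j hj
        omega
    rw [hK, e0]
  | case2 b0 b1 r0 r1 h1 h2 hle ih =>
    rw [eulerLoopA, if_neg hle]
    refine ih (k + 1) e1 ?_ e3 ?_ ?_
    · rw [e0, e1]; rfl
    · rw [e2, e3]; rfl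
    · intro j hj
      rcases Nat.lt_succ_iff_lt_or_eq.mp hj with h | h
      · exact hmin j h
      · subst h; omega

lemma eulerA_val (lim : Int) : euler100 lim = aB (Kk lim) := by
  unfold euler100
  exact loopA_eq lim 1 3 0 1 (by norm_num) (by norm_num) 0 rfl rfl rfl rfl (by omega)

-- greedy binary descent: folding Source B's step over the squarings lands just below the target
lemma descend (target : Int) (htg : 1 ≤ target) :
    ∀ (p : Int × Int) (hx : 3 ≤ p.1) (hy : 2 ≤ p.2) (j : Nat), p = gp j →
    ∃ k, (buildPows target p hx hy).foldr
          (fun q acc => if (zmul acc q).1 ≤ target then zmul acc q else acc) (1, 1) = sol k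
        ∧ (sol k).1 ≤ target ∧ target < (sol (k + 2 ^ j)).1 := by
  intro p hx hy j hp
  induction p, hx, hy using buildPows.induct target generalizing j with
  | case1 p hx hy hc ih =>
    obtain ⟨k, hfold, hk1, hk2⟩ := ih (j + 1) (by rw [hp]; rfl)
    rw [buildPows, dif_pos hc, List.foldr_cons, hfold]
    subst hp
    rw [sol_add_gp j k]
    by_cases hc2 : (sol (k + 2 ^ j)).1 ≤ target
    · rw [if_pos hc2]
      refine ⟨k + 2 ^ j, rfl, hc2, ?_⟩
      have : k + 2 ^ j + 2 ^ j = k + 2 ^ (j + 1) := by rw [pow_succ]; omega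
      rw [this]; exact hk2
    · rw [if_neg hc2]
      exact ⟨k, rfl, hk1, by omega⟩
  | case2 p hx hy hc =>
    rw [buildPows, dif_neg hc, List.foldr_cons, List.foldr_nil]
    subst hp
    have h0 : (zmul (1, 1) (gp j)).1 = (sol (0 + 2 ^ j)).1 := congrArg Prod.fst (sol_add_gp j 0)
    have hs0 : (sol 0).1 = 1 := rfl
    refine ⟨0, ?_, by omega, ?_⟩
    · rw [if_neg hc]; rfl
    · simp only [Nat.zero_add] at h0 ⊢
      omega

lemma eulerB_val (lim : Int) : euler100_alt lim = aB (Kk lim) := by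
  unfold euler100_alt eulerAltBody
  by_cases h1 : 1 > 2 * lim - 1
  · rw [if_pos h1]
    have hs0 : (sol 0).1 = 1 := rfl
    have hK : Kk lim = 0 := by
      rw [Kk, Nat.find_eq_iff]
      exact ⟨by omega, by omega⟩
    rw [hK]; rfl
  · rw [if_neg h1]
    obtain ⟨k, hfold, hk1, hk2⟩ :=
      descend (2 * lim - 1) (by omega) (3, 2) (by norm_num) (by norm_num) 0 rfl
    simp only [pow_zero] at hk2
    rw [List.foldl_reverse, hfold]
    have hK : Kk lim = k + 1 := by
      rw [Kk, Nat.find_eq_iff]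
      refine ⟨hk2, ?_⟩
      intro j hj
      have hjk : j ≤ k := by omega
      have := sol_x_mono.monotone hjk
      simp only [not_lt]
      omega
    have hsol : zmul (sol k) (3, 2) = sol (k + 1) := rfl
    rw [hsol, hK]
    have := (sol_link (k + 1)).1
    omega

-- ===== VERDICT (by name: the statement is the Claim_ definition above) =====
theorem euler100_spec : Claim_equal_euler100 := by
  intro lim _
  unfold Spec_euler100
  rw [eulerA_val, eulerB_val]
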